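-- pv_equiv track=rewrite | github.com/oronb/DataBases-ex1 | ex1.py | check_tables
-- ===== SOURCE A (Python) =====
-- CUSTOMERS_TABLE_NAME = "Customers"
--
-- ORDERS_TABLE_NAME = "Orders"
--
-- def check_tables(string):
--     comma_ind = string.find(",")
--     if comma_ind < 0:
--         return check_valid_table(string)
--     else:
--         left_string = string[:comma_ind]
--         right_string = string[comma_ind + 1:]
--         valid_left_part = check_valid_table(left_string)
--         if not valid_left_part:
--             return False
--         return check_tables(right_string)
--
-- def check_valid_table(string):
--     # perform all kinds of checks
--     string = string.replace(" ", "")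
--     if string == CUSTOMERS_TABLE_NAME or string == ORDERS_TABLE_NAME:
--         return True
--     else:
--         return False
-- ===== SOURCE B (Python) =====
-- CUSTOMERS_TABLE_NAME = "Customers"
--
-- ORDERS_TABLE_NAME = "Orders"
--
-- def check_tables(string):
--     # Single pass over the characters: accumulate the non-space characters
--     # of the current segment, check it at each comma and at the end.
--     cur = ""
--     for ch in string:
--         if ch == ',':
--             if cur != CUSTOMERS_TABLE_NAME and cur != ORDERS_TABLE_NAME:
--                 return False
--             cur = ""
--         elif ch != ' ':
--             cur += ch
--     return cur == CUSTOMERS_TABLE_NAME or cur == ORDERS_TABLE_NAME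
-- ===== Notes on version B (the rewrite author's own statement) =====
-- stated objective: alternative
-- what changed: Replaces the recursive find/slice/replace peeling of one comma-separated segment at a time with a single character-level scan that accumulates non-space characters and checks each segment at a comma or at the end.
import Mathlib
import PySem

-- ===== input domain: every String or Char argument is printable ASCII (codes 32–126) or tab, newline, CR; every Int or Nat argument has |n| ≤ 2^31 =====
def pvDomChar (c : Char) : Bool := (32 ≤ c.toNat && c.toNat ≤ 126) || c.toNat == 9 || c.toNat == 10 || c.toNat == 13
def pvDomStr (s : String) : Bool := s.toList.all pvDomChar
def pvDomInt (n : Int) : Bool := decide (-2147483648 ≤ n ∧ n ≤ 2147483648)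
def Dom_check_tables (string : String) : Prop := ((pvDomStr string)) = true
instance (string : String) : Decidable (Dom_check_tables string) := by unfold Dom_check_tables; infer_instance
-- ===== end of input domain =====

-- B replaces A's recursive find/slice peeling of one segment at a time by a single
-- linear character-level scan with an accumulator (alternative decomposition, one pass).

-- ===== PORT A =====
-- check_valid_table: remove all spaces, compare with the two table names
def check_valid_table (s : List Char) : Bool :=
  let s' := PySem.Chars.replace s [' '] []
  s' == "Customers".toList || s' == "Orders".toList

-- A's recursion, transliterated over the character list (find, slice [:i], slice [i+1:])
def check_tables_go (s : List Char) : Bool :=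
  let comma_ind := PySem.Chars.find s [',']
  if comma_ind < 0 then check_valid_table s
  else
    let left_string := PySem.List.slice s none (some comma_ind)
    let right_string := PySem.List.slice s (some (comma_ind + 1)) none
    if !check_valid_table left_string then false
    else check_tables_go right_string
termination_by s.length
decreasing_by
  have h0 : (0:Int) ≤ PySem.Chars.find s [','] := by omega
  have hsp := (PySem.Chars.find_spec h0).1
  have hlt : (PySem.Chars.find s [',']).toNat < s.length := by
    rcases hsp with ⟨t, ht⟩
    have := congrArg List.length ht
    simp at this
    omega
  rw [PySem.List.slice_from s (by omega : (0:Int) ≤ PySem.Chars.find s [','] + 1)]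
  have : (PySem.Chars.find s [','] + 1).toNat = (PySem.Chars.find s [',']).toNat + 1 := by omega
  rw [this]
  simp
  omega

def check_tables (string : String) : Bool := check_tables_go string.toList

-- ===== PORT B =====
-- B's for-loop with early return: recursion over the characters with accumulator cur
def check_tables_alt_go (cs : List Char) (cur : List Char) : Bool :=
  match cs with
  | [] => cur == "Customers".toList || cur == "Orders".toList
  | c :: rest =>
    if c = ',' then
      if cur ≠ "Customers".toList ∧ cur ≠ "Orders".toList then false
      else check_tables_alt_go rest []
    else if c = ' ' then check_tables_alt_go rest cur
    else check_tables_alt_go rest (cur ++ [c])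

def check_tables_alt (string : String) : Bool := check_tables_alt_go string.toList []

-- ===== PRECONDITION & SPEC =====
def Spec_check_tables (string : String) (out : Bool) : Prop := out = check_tables_alt string
instance (string : String) (out : Bool) : Decidable (Spec_check_tables string out) := by unfold Spec_check_tables; infer_instance

-- ===== CLAIM (what is proved, stated in full; the proofs are below) =====
def Claim_equal_check_tables : Prop := ∀ (string : String), Dom_check_tables string → Spec_check_tables string (check_tables string)

-- ===== LEMMAS AND PROOFS =====

-- replace s " " "" removes exactly the spaces
theorem replace_go_space (fuel : Nat) (l acc : List Char) (h : l.length ≤ fuel) :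
    PySem.Chars.replace.go [' '] [] fuel l acc
      = acc.reverse ++ l.filter (fun c => c != ' ') := by
  induction fuel generalizing l acc with
  | zero =>
    match l with
    | [] => simp [PySem.Chars.replace.go]
    | c :: t => simp at h
  | succ n ih =>
    match l with
    | [] => simp [PySem.Chars.replace.go]
    | c :: t =>
      simp only [PySem.Chars.replace.go]
      by_cases hc : c = ' '
      · subst hc
        simp only [List.isPrefixOf, List.length]
        rw [if_pos (by simp)]
        simp only [List.length_cons] at h
        rw [ih _ _ (by simpa using Nat.le_of_succ_le_succ h)]
        simp
      · rw [if_neg (by simp [List.isPrefixOf]; intro h'; exact hc h'.symm)]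
        simp only [List.length_cons] at h
        rw [ih _ _ (Nat.le_of_succ_le_succ h)]
        simp [hc]

theorem replace_space (s : List Char) :
    PySem.Chars.replace s [' '] [] = s.filter (fun c => c != ' ') := by
  simp only [PySem.Chars.replace, List.isEmpty]
  rw [if_neg (by simp)]
  simpa using replace_go_space s.length s []

theorem mem_iff_infix_singleton (a : Char) (l : List Char) : a ∈ l ↔ [a] <:+: l := by
  constructor
  · intro h
    obtain ⟨u, v, huv⟩ := List.append_of_mem h
    exact ⟨u, v, by simp [huv]⟩
  · intro h
    exact h.sublist.subset (List.mem_singleton_self a)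

-- B's loop over a comma-free block: it just accumulates the non-space characters
theorem alt_go_nocomma (l : List Char) (rest cur : List Char) (h : ',' ∉ l) :
    check_tables_alt_go (l ++ rest) cur
      = check_tables_alt_go rest (cur ++ l.filter (fun c => c != ' ')) := by
  induction l generalizing cur with
  | nil => simp
  | cons c t ih =>
    have hc : c ≠ ',' := fun hc => h (hc ▸ List.mem_cons_self ..)
    have ht : ',' ∉ t := fun hm => h (List.mem_cons_of_mem _ hm)
    by_cases hsp : c = ' '
    · subst hsp
      simp only [List.cons_append, check_tables_alt_go]
      rw [if_true]
      simpa using ih cur ht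
    · simp only [List.cons_append, check_tables_alt_go, if_neg hc, if_neg hsp]
      rw [ih _ ht]
      simp [hsp]

theorem alt_go_comma (r cur : List Char) :
    check_tables_alt_go (',' :: r) cur
      = if cur = "Customers".toList ∨ cur = "Orders".toList then check_tables_alt_go r [] else false := by
  simp only [check_tables_alt_go]
  split_ifs with h1 h2 <;> tauto

theorem go_eq (s : List Char) : check_tables_go s = check_tables_alt_go s [] := by
  induction hn : s.length using Nat.strong_induction_on generalizing s with
  | _ n ih =>
  subst hn
  rw [check_tables_go]
  by_cases hneg : PySem.Chars.find s [','] < 0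
  · -- no comma in s
    have hno : ¬ [','] <:+: s := by
      rw [← PySem.Chars.find_eq_neg_one_iff]
      have := PySem.Chars.neg_one_le_find s [',']
      omega
    have hmem : ',' ∉ s := fun h => hno ((mem_iff_infix_singleton _ _).1 h)
    rw [if_pos hneg]
    have := alt_go_nocomma s [] [] hmem
    rw [List.append_nil] at this
    rw [this]
    simp [check_valid_table, replace_space, check_tables_alt_go]
  · -- first comma at index k
    rw [if_neg hneg]
    have h0 : (0:Int) ≤ PySem.Chars.find s [','] := by omega
    obtain ⟨hpre, hmin⟩ := PySem.Chars.find_spec h0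
    set k := (PySem.Chars.find s [',']).toNat with hk
    obtain ⟨t, ht⟩ := hpre
    have hklt : k < s.length := by
      have := congrArg List.length ht
      simp at this
      omega
    have h1 : s.drop k = ',' :: s.drop (k + 1) := by
      rw [← ht]
      congr 1
      have h2 := congrArg List.tail ht
      simpa [List.tail_drop] using h2
    have hsplit : s = s.take k ++ ',' :: s.drop (k + 1) := by
      conv_lhs => rw [← List.take_append_drop k s, h1]
    have hnc : ',' ∉ s.take k := by
      intro hmem
      obtain ⟨i, hi, hgi⟩ := List.mem_iff_getElem.1 hmem
      simp at hi
      apply hmin i hi.1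
      refine ⟨s.drop (i + 1), ?_⟩
      rw [List.getElem_take] at hgi
      have hd : s.drop i = s[i] :: s.drop (i + 1) :=
        List.drop_eq_getElem_cons (by omega)
      simp [hd, hgi]
    have hleft : PySem.List.slice s none (some (PySem.Chars.find s [','])) = s.take k := by
      rw [PySem.List.slice_to s h0]
    have hright : PySem.List.slice s (some (PySem.Chars.find s [','] + 1)) none = s.drop (k + 1) := by
      rw [PySem.List.slice_from s (by omega : (0:Int) ≤ PySem.Chars.find s [','] + 1)]
      congr 1
      omega
    rw [hleft, hright]
    conv_rhs => rw [hsplit]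
    rw [alt_go_nocomma _ _ _ hnc, List.nil_append, alt_go_comma]
    have hrec : check_tables_go (s.drop (k + 1)) = check_tables_alt_go (s.drop (k + 1)) [] := by
      apply ih (s.drop (k + 1)).length _ _ rfl
      simp
      omega
    by_cases hv : (s.take k).filter (fun c => c != ' ') = "Customers".toList ∨
                  (s.take k).filter (fun c => c != ' ') = "Orders".toList
    · have hcvt : check_valid_table (s.take k) = true := by
        simp only [check_valid_table, replace_space, Bool.or_eq_true, beq_iff_eq]
        exact hv
      simp only [hcvt]
      rw [if_pos hv]
      simpa using hrec
    · have hcvt : check_valid_table (s.take k) = false := by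
        simp only [check_valid_table, replace_space, Bool.or_eq_false_iff, beq_eq_false_iff_ne, ne_eq]
        tauto
      simp only [hcvt]
      rw [if_neg hv]
      simp

-- ===== VERDICT (by name: the statement is the Claim_ definition above) =====
theorem check_tables_spec : Claim_equal_check_tables := by
  intro s _
  unfold Spec_check_tables check_tables check_tables_alt
  exact go_eq s.toList
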